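-- pv_equiv track=rewrite | github.com/jingDi917/others | c_3d/scripts/data_status.py | isTuple
-- ===== SOURCE A (Python) =====
-- tupleSet = [(0,9),(1,8),(2,7),(3,6),(4,5)]
--
-- def isTuple(i,j,k):
--     arr = [i,j,k]
--     arr.sort()
--     is_tuple = False
--     for t in tupleSet:
--         tmoFlag = True
--         for num in list(t):
--             if num not in arr:
--                 tmoFlag = False
--                 break
--         if tmoFlag:
--             is_tuple = True
--             break
--     return is_tuple
-- ===== SOURCE B (Python) =====
-- def isTuple(i, j, k):
--     vals = (i, j, k)
--     for v in vals:
--         if 0 <= v <= 9 and (9 - v) in vals: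
--             return True
--     return False
-- ===== Notes on version B (the rewrite author's own statement) =====
-- stated objective: simpler
-- what changed: Instead of sorting the inputs and scanning the five preset pairs with a nested membership loop, B loops once over the three inputs and tests whether the 9-complement of an in-range value is also among the inputs.
import Mathlib
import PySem

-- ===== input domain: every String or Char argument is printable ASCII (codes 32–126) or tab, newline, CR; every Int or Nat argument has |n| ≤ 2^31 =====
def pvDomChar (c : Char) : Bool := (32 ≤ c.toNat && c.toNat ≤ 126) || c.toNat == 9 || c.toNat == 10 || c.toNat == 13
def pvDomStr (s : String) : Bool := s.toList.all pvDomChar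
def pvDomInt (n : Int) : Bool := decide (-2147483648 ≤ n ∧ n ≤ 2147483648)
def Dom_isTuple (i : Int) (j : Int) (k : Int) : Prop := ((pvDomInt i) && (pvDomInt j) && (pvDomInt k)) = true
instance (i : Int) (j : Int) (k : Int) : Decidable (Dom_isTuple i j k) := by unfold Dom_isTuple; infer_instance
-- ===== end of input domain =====

-- B replaces A's sort + scan of the five preset pairs by a single pass over the
-- three inputs testing the 9-complement; objective: simpler. Equivalence proved on Dom.
-- ===== PORT A =====
def tupleSet : List (Int × Int) := [(0,9),(1,8),(2,7),(3,6),(4,5)]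

-- inner 'for num in list(t)' with break: fails as soon as some num is not in arr
def isTupleInner (t : List Int) (arr : List Int) : Bool :=
  match t with
  | [] => true
  | num :: rest => if arr.contains num then isTupleInner rest arr else false

-- outer 'for t in tupleSet' with break on first match
def isTupleOuter (ts : List (Int × Int)) (arr : List Int) : Bool :=
  match ts with
  | [] => false
  | t :: rest => if isTupleInner [t.1, t.2] arr then true else isTupleOuter rest arr

def isTuple (i : Int) (j : Int) (k : Int) : Bool :=
  let arr := PySem.List.sorted [i, j, k] (fun x => x) false
  isTupleOuter tupleSet arr

-- ===== PORT B =====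
-- single pass over the inputs: an in-range value whose 9-complement is also an input
def isTupleAltLoop (vs : List Int) (vals : List Int) : Bool :=
  match vs with
  | [] => false
  | v :: rest =>
    if 0 ≤ v && v ≤ 9 && vals.contains (9 - v) then true else isTupleAltLoop rest vals

def isTuple_alt (i : Int) (j : Int) (k : Int) : Bool :=
  isTupleAltLoop [i, j, k] [i, j, k]

-- ===== PRECONDITION & SPEC =====
def Spec_isTuple (i : Int) (j : Int) (k : Int) (out : Bool) : Prop := out = isTuple_alt i j k
instance (i : Int) (j : Int) (k : Int) (out : Bool) : Decidable (Spec_isTuple i j k out) := by unfold Spec_isTuple; infer_instance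

-- ===== CLAIM (what is proved, stated in full; the proofs are below) =====
def Claim_equal_isTuple : Prop := ∀ (i : Int) (j : Int) (k : Int), Dom_isTuple i j k → Spec_isTuple i j k (isTuple i j k)

-- ===== LEMMAS AND PROOFS =====

theorem pv_if_false (P : Prop) [inst : Decidable P] (b : Bool) :
    (if P then b else false) = (decide P && b) := by
  split_ifs with h <;> simp [h]

theorem pv_if_true (P : Prop) [inst : Decidable P] (b : Bool) :
    (if P then true else b) = (decide P || b) := by
  split_ifs with h <;> simp [h]

-- A's pair scan implies B's complement test: take the pair element that is a = some input.
theorem pv_toB (i j k a b : Int) (hab : a + b = 9) (h0 : 0 ≤ a) (h9 : a ≤ 9)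
    (ha : a = i ∨ a = j ∨ a = k) (hb : b = i ∨ b = j ∨ b = k) :
    (0 ≤ i ∧ i ≤ 9) ∧ (9 - i = i ∨ 9 - i = j ∨ 9 - i = k) ∨
      (0 ≤ j ∧ j ≤ 9) ∧ (9 - j = i ∨ 9 - j = j ∨ 9 - j = k) ∨
        (0 ≤ k ∧ k ≤ 9) ∧ (9 - k = i ∨ 9 - k = j ∨ 9 - k = k) := by
  rcases ha with rfl | rfl | rfl
  · exact Or.inl ⟨⟨h0, h9⟩, by omega⟩
  · exact Or.inr (Or.inl ⟨⟨h0, h9⟩, by omega⟩)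
  · exact Or.inr (Or.inr ⟨⟨h0, h9⟩, by omega⟩)

-- B's complement test implies A's pair scan: the pair is {v, 9-v} for the in-range input v.
theorem pv_toA (i j k v : Int) (h0 : 0 ≤ v) (h9 : v ≤ 9)
    (hv : v = i ∨ v = j ∨ v = k) (hc : 9 - v = i ∨ 9 - v = j ∨ 9 - v = k) :
    (0 = i ∨ 0 = j ∨ 0 = k) ∧ (9 = i ∨ 9 = j ∨ 9 = k) ∨
      (1 = i ∨ 1 = j ∨ 1 = k) ∧ (8 = i ∨ 8 = j ∨ 8 = k) ∨
        (2 = i ∨ 2 = j ∨ 2 = k) ∧ (7 = i ∨ 7 = j ∨ 7 = k) ∨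
          (3 = i ∨ 3 = j ∨ 3 = k) ∧ (6 = i ∨ 6 = j ∨ 6 = k) ∨
            (4 = i ∨ 4 = j ∨ 4 = k) ∧ (5 = i ∨ 5 = j ∨ 5 = k) := by
  interval_cases v
  · exact Or.inl ⟨hv, by omega⟩
  · exact Or.inr (Or.inl ⟨hv, by omega⟩)
  · exact Or.inr (Or.inr (Or.inl ⟨hv, by omega⟩))
  · exact Or.inr (Or.inr (Or.inr (Or.inl ⟨hv, by omega⟩)))
  · exact Or.inr (Or.inr (Or.inr (Or.inr ⟨hv, by omega⟩)))
  · exact Or.inr (Or.inr (Or.inr (Or.inr ⟨by omega, hv⟩)))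
  · exact Or.inr (Or.inr (Or.inr (Or.inl ⟨by omega, hv⟩)))
  · exact Or.inr (Or.inr (Or.inl ⟨by omega, hv⟩))
  · exact Or.inr (Or.inl ⟨by omega, hv⟩)
  · exact Or.inl ⟨by omega, hv⟩

-- ===== VERDICT (by name: the statement is the Claim_ definition above) =====
theorem isTuple_spec : Claim_equal_isTuple := by
  intro i j k _
  unfold Spec_isTuple
  have hs : ∀ x : Int, (PySem.List.sorted [i, j, k] (fun y => y) false).contains x
      = ([i, j, k] : List Int).contains x := by
    intro x
    simp [PySem.List.mem_sorted]
  simp only [isTuple, isTuple_alt, isTupleOuter, isTupleInner, isTupleAltLoop, tupleSet, hs,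
    pv_if_false, pv_if_true, Bool.decide_eq_true]
  rw [Bool.eq_iff_iff]
  simp only [List.contains_cons, List.contains_nil, Bool.or_false, Bool.and_eq_true,
    Bool.or_eq_true, decide_eq_true_eq, beq_iff_eq, and_true]
  constructor
  · rintro (⟨ha, hb⟩ | ⟨ha, hb⟩ | ⟨ha, hb⟩ | ⟨ha, hb⟩ | ⟨ha, hb⟩)
    · exact pv_toB i j k 0 9 (by norm_num) (by norm_num) (by norm_num) ha hb
    · exact pv_toB i j k 1 8 (by norm_num) (by norm_num) (by norm_num) ha hb
    · exact pv_toB i j k 2 7 (by norm_num) (by norm_num) (by norm_num) ha hb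
    · exact pv_toB i j k 3 6 (by norm_num) (by norm_num) (by norm_num) ha hb
    · exact pv_toB i j k 4 5 (by norm_num) (by norm_num) (by norm_num) ha hb
  · rintro (⟨⟨h0, h9⟩, hc⟩ | ⟨⟨h0, h9⟩, hc⟩ | ⟨⟨h0, h9⟩, hc⟩)
    · exact pv_toA i j k i h0 h9 (Or.inl rfl) hc
    · exact pv_toA i j k j h0 h9 (Or.inr (Or.inl rfl)) hc
    · exact pv_toA i j k k h0 h9 (Or.inr (Or.inr rfl)) hc
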